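-- pv_equiv track=rewrite | github.com/spadani/AppliedDataAnalytics | IntroPython/Assignment4/6.29.py | sumdoubleevenplace
-- ===== SOURCE A (Python) =====
-- def convertnumber(number):
--     numberlist = []
--     numstring = str(number)
--     numlist = list(numstring)
--     for character in numlist:
--         numberlist.append(int(character))
--     return numberlist
--
-- def getdigit(number):
--     sum = 0
--     # is a single digit
--     if prefixmatched(number, number):
--         return number
--     else:
--         numlist = convertnumber(number)
--         for digit in numlist:
--             sum += digit
--         return sum
--
-- def sumdoubleevenplace(number):
--     digitlist = []
--     numlist = convertnumber(number)
--     numlist.reverse()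
--     sum = 0
--     for i in range(len(numlist)):
--         digit = numlist[i]
--         if i % 2 != 0:
--             doubledigit = digit * 2
--             digitlist.append(getdigit(doubledigit))
--     for digit in digitlist:
--         sum += digit
--     return sum
--
-- def prefixmatched(number, d):
--     return d == getprefix(number, 1)
--
-- def getsize(d):
--     return len(str(d))
--
-- def getprefix(number, k):
--     if getsize(number) < k:
--         return number
--     # convert number to string
--     numstring = str(number)
--     # convert string to list
--     numlist = list(numstring)
--     # get the k digits
--     kdigitslist = numlist[0:k]
--     # convert to string
--     kdigitsstring = ''.join(kdigitslist)
--     # convert to integer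
--     kdigits = int(kdigitsstring)
--     return kdigits
-- ===== SOURCE B (Python) =====
-- def sumdoubleevenplace(number):
--     digits = [int(c) for c in str(number)]
--     total = 0
--     for i, d in enumerate(reversed(digits)):
--         if i % 2 == 1:
--             dd = d * 2
--             total += dd - 9 if dd > 9 else dd
--     return total
-- ===== Notes on version B (the rewrite author's own statement) =====
-- stated objective: simpler
-- what changed: B is one self-contained single pass with enumerate over the reversed digits, replacing A's helper cascade (convertnumber/getdigit/prefixmatched/getprefix) and its build-a-list-then-sum second loop with a running total and the closed form d-9 if d>9 else d for the digit sum of a doubled digit.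
import Mathlib
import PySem

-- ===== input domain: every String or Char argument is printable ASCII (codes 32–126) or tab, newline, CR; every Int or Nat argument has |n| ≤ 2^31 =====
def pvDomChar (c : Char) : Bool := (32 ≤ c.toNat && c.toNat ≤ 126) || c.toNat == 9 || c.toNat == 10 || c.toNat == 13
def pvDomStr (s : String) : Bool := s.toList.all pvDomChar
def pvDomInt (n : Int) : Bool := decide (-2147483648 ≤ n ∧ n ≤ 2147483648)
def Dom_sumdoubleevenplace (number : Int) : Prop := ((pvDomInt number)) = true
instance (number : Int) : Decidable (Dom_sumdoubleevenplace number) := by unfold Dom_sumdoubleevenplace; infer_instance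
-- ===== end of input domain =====

-- ===== PORT A =====
-- B rewrites A as one self-contained pass with a closed-form doubled-digit sum; A raises ValueError on negative input, excluded by Pre_.

-- helper: int(character) for a single character, as A's convertnumber does (total via getD;
-- under Pre_ every character of str(number) is a digit, so ofStr? is always some)
def pvCharInt (c : Char) : Int :=
  (PySem.Int.ofStr? (String.ofList [c])).getD 0

-- port of convertnumber
def convertnumberA (number : Int) : List Int :=
  (PySem.Int.toStr number).toList.foldl (fun acc c => acc ++ [pvCharInt c]) []

-- port of getsize
def getsizeA (d : Int) : Int :=
  PySem.Str.len (PySem.Int.toStr d)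

-- port of getprefix (int(''.join(kdigitslist)) ported as ofChars? on the sliced chars, with getD 0 for the
-- ValueError case that Pre_ excludes)
def getprefixA (number k : Int) : Int :=
  if getsizeA number < k then number
  else
    let numlist := (PySem.Int.toStr number).toList
    let kdigitslist := PySem.List.slice numlist (some 0) (some k)
    (PySem.Int.ofChars? kdigitslist).getD 0

-- port of prefixmatched
def prefixmatchedA (number d : Int) : Bool :=
  d == getprefixA number 1

-- port of getdigit
def getdigitA (number : Int) : Int :=
  if prefixmatchedA number number then number
  else (convertnumberA number).foldl (fun s d => s + d) 0

def sumdoubleevenplace (number : Int) : Int :=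
  let numlist := (convertnumberA number).reverse
  let digitlist :=
    (PySem.List.pyRange 0 (PySem.List.len numlist) 1).foldl
      (fun acc i =>
        let digit := PySem.List.pyGetD numlist i 0
        if PySem.Int.mod i 2 != 0 then acc ++ [getdigitA (digit * 2)] else acc) []
  digitlist.foldl (fun s d => s + d) 0

-- ===== PORT B =====
def sumdoubleevenplace_alt (number : Int) : Int :=
  let digits := (PySem.Int.toStr number).toList.map pvCharInt
  (PySem.List.enumerate digits.reverse).foldl
    (fun total p =>
      if PySem.Int.mod p.1 2 == 1 then
        let dd := p.2 * 2
        total + (if dd > 9 then dd - 9 else dd)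
      else total) 0

-- ===== PRECONDITION & SPEC =====
-- Pre_ excludes exactly the negative inputs, on which both A and B raise ValueError (int('-')).
def Pre_sumdoubleevenplace (number : Int) : Prop := 0 ≤ number
instance (number : Int) : Decidable (Pre_sumdoubleevenplace number) := by unfold Pre_sumdoubleevenplace; infer_instance
def pvWitness_sumdoubleevenplace : Int := 4567

def Spec_sumdoubleevenplace (number : Int) (out : Int) : Prop := out = sumdoubleevenplace_alt number
instance (number : Int) (out : Int) : Decidable (Spec_sumdoubleevenplace number out) := by unfold Spec_sumdoubleevenplace; infer_instance

-- ===== CLAIM (what is proved, stated in full; the proofs are below) =====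
def Claim_equal_sumdoubleevenplace : Prop := ∀ (number : Int), Dom_sumdoubleevenplace number → Pre_sumdoubleevenplace number → Spec_sumdoubleevenplace number (sumdoubleevenplace number)

-- ===== LEMMAS AND PROOFS =====

def pvDigitChars : List Char := ['0','1','2','3','4','5','6','7','8','9']

theorem digitChar_mem (m : Nat) (h : m < 10) : Nat.digitChar m ∈ pvDigitChars := by
  interval_cases m <;> decide

theorem toDigitsCore_mem (fuel : Nat) : ∀ (n : Nat) (ds : List Char),
    (∀ c ∈ ds, c ∈ pvDigitChars) → ∀ c ∈ Nat.toDigitsCore 10 fuel n ds, c ∈ pvDigitChars := by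
  induction fuel with
  | zero => intro n ds hds c hc; exact hds c hc
  | succ fuel ih =>
    intro n ds hds c hc
    simp only [Nat.toDigitsCore] at hc
    split at hc
    · rcases List.mem_cons.mp hc with h | h
      · exact h ▸ digitChar_mem _ (Nat.mod_lt _ (by norm_num))
      · exact hds c h
    · refine ih _ _ ?_ c hc
      intro c' hc'
      rcases List.mem_cons.mp hc' with h | h
      · exact h ▸ digitChar_mem _ (Nat.mod_lt _ (by norm_num))
      · exact hds c' h

theorem toChars_mem (n : Int) (hn : 0 ≤ n) : ∀ c ∈ PySem.Int.toChars n, c ∈ pvDigitChars := by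
  intro c hc
  unfold PySem.Int.toChars at hc
  rw [if_neg (by omega)] at hc
  exact toDigitsCore_mem _ _ _ (by simp) c hc

theorem pvCharInt_bounds (c : Char) (hc : c ∈ pvDigitChars) :
    0 ≤ pvCharInt c ∧ pvCharInt c ≤ 9 := by
  fin_cases hc <;> decide

-- key pointwise fact: A's getdigit on a doubled digit equals B's closed form
theorem getdigitA_closed (d : Int) (h0 : 0 ≤ d) (h9 : d ≤ 9) :
    getdigitA (d * 2) = (if d * 2 > 9 then d * 2 - 9 else d * 2) := by
  interval_cases d <;> decide

theorem convertnumberA_eq_map (number : Int) :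
    convertnumberA number = (PySem.Int.toStr number).toList.map pvCharInt := by
  unfold convertnumberA
  simpa using PySem.List.foldl_append_singleton_eq_map pvCharInt (PySem.Int.toStr number).toList []

theorem foldl_add_shift (g : Int → Int → Int) (hg : ∀ a x, g a x = a + g 0 x)
    (l : List Int) : ∀ (a : Int), l.foldl g a = a + l.foldl g 0 := by
  induction l with
  | nil => intro a; simp
  | cons x xs ih =>
    intro a
    simp only [List.foldl_cons]
    rw [ih (g a x), ih (g 0 x), hg a x]
    ring

theorem sum_shift (l : List Int) (a : Int) :
    l.foldl (fun s d => s + d) a = a + l.foldl (fun s d => s + d) 0 :=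
  foldl_add_shift _ (by intro a x; simp) l a

theorem if_shift (p : Int → Bool) (g : Int → Int) (l : List Int) (a : Int) :
    l.foldl (fun s i => if p i then s + g i else s) a
      = a + l.foldl (fun s i => if p i then s + g i else s) 0 :=
  foldl_add_shift _ (by intro a x; by_cases h : p x <;> simp [h]) l a

theorem sum_foldl_append (p : Int → Bool) (g : Int → Int) (l : List Int) : ∀ (acc : List Int),
    (l.foldl (fun acc i => if p i then acc ++ [g i] else acc) acc).foldl (fun s d => s + d) 0
      = acc.foldl (fun s d => s + d) 0 + l.foldl (fun s i => if p i then s + g i else s) 0 := by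
  induction l with
  | nil => intro acc; simp
  | cons x xs ih =>
    intro acc
    simp only [List.foldl_cons]
    by_cases hx : p x
    · rw [if_pos hx, if_pos hx, ih, List.foldl_append, List.foldl_cons, List.foldl_nil,
        sum_shift, if_shift p g xs (0 + g x)]
      ring
    · rw [if_neg hx, if_neg hx, ih]

-- ===== VERDICT (by name: the statement is the Claim_ definition above) =====
theorem sumdoubleevenplace_spec : Claim_equal_sumdoubleevenplace := by
  intro number _ hpre
  unfold Spec_sumdoubleevenplace sumdoubleevenplace sumdoubleevenplace_alt
  rw [convertnumberA_eq_map]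
  set L := (PySem.Int.toStr number).toList.map pvCharInt with hL
  have hmem : ∀ d ∈ L, 0 ≤ d ∧ d ≤ 9 := by
    intro d hd
    rw [hL] at hd
    obtain ⟨c, hc, rfl⟩ := List.mem_map.mp hd
    rw [PySem.Int.toList_toStr] at hc
    exact pvCharInt_bounds c (toChars_mem number hpre c hc)
  rw [sum_foldl_append]
  simp only [List.foldl_nil, zero_add]
  rw [PySem.List.enumerate_eq_map_pyRange L.reverse 0, List.foldl_map]
  simp only [PySem.List.len_eq, List.length_reverse]
  apply PySem.List.foldl_congr_mem
  intro acc i hi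
  rw [PySem.List.mem_pyRange_one] at hi
  have hget : PySem.List.pyGetD L.reverse i 0 ∈ L := by
    rw [← List.mem_reverse]
    refine PySem.List.pyGetD_mem _ _ ?_
    simp [PySem.Raise.InRange]
    omega
  obtain ⟨h0, h9⟩ := hmem _ hget
  by_cases hpar : i % 2 = 1
  · rw [show (PySem.Int.mod i 2 != 0) = true by simp [hpar],
        show (PySem.Int.mod i 2 == 1) = true by simp [hpar]]
    simp only [if_true]
    rw [getdigitA_closed _ h0 h9]
  · have h0' : i % 2 = 0 := by omega
    rw [show (PySem.Int.mod i 2 != 0) = false by simp [h0'],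
        show (PySem.Int.mod i 2 == 1) = false by simp [h0']]
    simp
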